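-- pv_equiv track=rewrite | github.com/arslan70/haytham | haytham/feedback/cascade_engine.py | is_cascade_needed
-- ===== SOURCE A (Python) =====
-- def is_cascade_needed(
--     affected_stages: list[str],
--     workflow_stages: list[str],
-- ) -> bool:
--     """Check if cascading to downstream stages is needed.
--
--     Cascading is needed when the affected stage is not the last stage
--     in the workflow.
--
--     Args:
--         affected_stages: List of stages directly affected by feedback
--         workflow_stages: Ordered list of all stages in the workflow
--
--     Returns:
--         True if downstream stages need to be revised, False otherwise
--
--     Example:
--         >>> stages = ["mvp-scope", "capability-model"]
--         >>> is_cascade_needed(["mvp-scope"], stages)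
--         True
--         >>> is_cascade_needed(["capability-model"], stages)
--         False
--     """
--     if not affected_stages or not workflow_stages:
--         return False
--
--     # Find the earliest affected stage
--     earliest_index = None
--     for stage in affected_stages:
--         try:
--             index = workflow_stages.index(stage)
--             if earliest_index is None or index < earliest_index:
--                 earliest_index = index
--         except ValueError:
--             continue
--
--     if earliest_index is None:
--         return False
--
--     # Cascade is needed if there are stages after the earliest affected one
--     return earliest_index < len(workflow_stages) - 1
-- ===== SOURCE B (Python) =====
-- def is_cascade_needed(
--     affected_stages: list[str],
--     workflow_stages: list[str],
-- ) -> bool: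
--     """Cascade is needed iff some affected stage occurs before the last
--     workflow stage, i.e. is a member of workflow_stages[:-1]."""
--     prefix = workflow_stages[:-1]
--     return any(stage in prefix for stage in affected_stages)
-- ===== Notes on version B (the rewrite author's own statement) =====
-- stated objective: simpler
-- what changed: Replaces the try/except minimum-index scan plus final comparison with a single short-circuiting membership test of each affected stage in the non-last prefix workflow_stages[:-1]; no running minimum and no index computation.
import Mathlib
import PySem

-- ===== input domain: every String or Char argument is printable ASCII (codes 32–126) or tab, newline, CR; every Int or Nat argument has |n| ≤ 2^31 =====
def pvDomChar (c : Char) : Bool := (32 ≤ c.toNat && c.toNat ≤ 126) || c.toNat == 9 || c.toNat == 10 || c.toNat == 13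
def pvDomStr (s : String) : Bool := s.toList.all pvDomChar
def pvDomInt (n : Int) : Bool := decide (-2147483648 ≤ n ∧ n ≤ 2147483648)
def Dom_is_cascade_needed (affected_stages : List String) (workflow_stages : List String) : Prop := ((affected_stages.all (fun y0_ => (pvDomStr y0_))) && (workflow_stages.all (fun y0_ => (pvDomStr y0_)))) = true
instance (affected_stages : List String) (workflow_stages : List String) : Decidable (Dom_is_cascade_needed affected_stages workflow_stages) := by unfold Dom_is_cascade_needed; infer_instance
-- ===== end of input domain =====

-- B replaces A's minimum-index scan with a short-circuit membership test in workflow_stages[:-1] (simpler decomposition, same exact result).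


-- ===== PORT A =====
-- loop body of A: try workflow.index(stage) / keep the smaller index, ValueError → continue
def pvCascadeStep (workflow_stages : List String) (acc : Option Nat) (stage : String) : Option Nat :=
  match PySem.List.index? workflow_stages stage with
  | some idx =>
      match acc with
      | none => some idx
      | some e => if idx < e then some idx else acc
  | none => acc

def is_cascade_needed (affected_stages : List String) (workflow_stages : List String) : Bool :=
  if affected_stages.isEmpty || workflow_stages.isEmpty then false
  else
    match affected_stages.foldl (pvCascadeStep workflow_stages) none with
    | none => false
    | some earliest_index => decide ((earliest_index : Int) < (workflow_stages.length : Int) - 1)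

-- ===== PORT B =====
def is_cascade_needed_alt (affected_stages : List String) (workflow_stages : List String) : Bool :=
  let pfx := PySem.List.slice workflow_stages none (some (-1))
  affected_stages.any (fun stage => pfx.contains stage)

-- ===== PRECONDITION & SPEC =====
def Spec_is_cascade_needed (affected_stages : List String) (workflow_stages : List String) (out : Bool) : Prop := out = is_cascade_needed_alt affected_stages workflow_stages
instance (affected_stages : List String) (workflow_stages : List String) (out : Bool) : Decidable (Spec_is_cascade_needed affected_stages workflow_stages out) := by unfold Spec_is_cascade_needed; infer_instance

-- ===== CLAIM (what is proved, stated in full; the proofs are below) =====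
def Claim_equal_is_cascade_needed : Prop := ∀ (affected_stages : List String) (workflow_stages : List String), Dom_is_cascade_needed affected_stages workflow_stages → Spec_is_cascade_needed affected_stages workflow_stages (is_cascade_needed affected_stages workflow_stages)

-- ===== LEMMAS AND PROOFS =====

-- "acc names an index strictly before the last position of w"
def pvBefore (workflow_stages : List String) (acc : Option Nat) : Bool :=
  match acc with
  | none => false
  | some e => decide (e + 1 < workflow_stages.length)

-- per-stage: the first occurrence of s is before the last position iff s is in dropLast
lemma index?_before_iff (w : List String) (s : String) :
    (∃ k, PySem.List.index? w s = some k ∧ k + 1 < w.length) ↔ s ∈ w.dropLast := by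
  rw [List.dropLast_eq_take, List.mem_take_iff_getElem]
  constructor
  · rintro ⟨k, hk, hlt⟩
    obtain ⟨hklen, hget, -⟩ := PySem.List.getElem_of_index?_eq_some hk
    exact ⟨k, by omega, hget⟩
  · rintro ⟨j, hj, hjs⟩
    have hmem : s ∈ w := hjs ▸ List.getElem_mem _
    obtain ⟨k, hk⟩ := Option.isSome_iff_exists.mp ((PySem.List.index?_isSome_iff w s).mpr hmem)
    obtain ⟨hklen, hget, hmin⟩ := PySem.List.getElem_of_index?_eq_some hk
    refine ⟨k, hk, ?_⟩
    by_contra hcon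
    exact hmin j (by omega) hjs

-- the fold computes the minimum; pvBefore of the fold result is "acc before ∨ some stage in dropLast"
lemma fold_before (w : List String) (l : List String) (acc : Option Nat) :
    pvBefore w (l.foldl (pvCascadeStep w) acc)
      = (pvBefore w acc || l.any (fun s => decide (s ∈ w.dropLast))) := by
  induction l generalizing acc with
  | nil => simp
  | cons s t ih =>
    simp only [List.foldl_cons, List.any_cons, ih]
    have hstep : pvBefore w (pvCascadeStep w acc s)
        = (pvBefore w acc || decide (s ∈ w.dropLast)) := by
      have hiff := index?_before_iff w s
      unfold pvCascadeStep
      cases hidx : PySem.List.index? w s with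
      | none =>
        have : ¬ s ∈ w.dropLast := by
          intro hs
          obtain ⟨k, hk, -⟩ := hiff.mpr hs
          rw [hidx] at hk
          simp at hk
        simp [this]
      | some k =>
        by_cases hk : k + 1 < w.length
        · have hs : s ∈ w.dropLast := hiff.mp ⟨k, hidx, hk⟩
          cases acc with
          | none => simp [pvBefore, hs, hk]
          | some e =>
            by_cases hke : k < e <;> simp [pvBefore, hs, hke] <;> omega
        · have hs : ¬ s ∈ w.dropLast := by
            intro hs
            obtain ⟨k', hk', hlt⟩ := hiff.mpr hs
            rw [hidx] at hk'
            obtain rfl : k = k' := Option.some.inj hk'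
            exact hk hlt
          cases acc with
          | none => simp [pvBefore, hs, hk]
          | some e =>
            by_cases hke : k < e
            · have he : ¬ e + 1 < w.length := by omega
              simp [pvBefore, hs, hke, hk, he]
            · simp [pvBefore, hke, hs]
    rw [hstep, Bool.or_assoc]

theorem pv_main (affected_stages workflow_stages : List String) :
    is_cascade_needed affected_stages workflow_stages
      = is_cascade_needed_alt affected_stages workflow_stages := by
  unfold is_cascade_needed is_cascade_needed_alt
  rw [PySem.List.slice_to_neg_one]
  by_cases ha : affected_stages = []
  · simp [ha]
  by_cases hw : workflow_stages = []
  · simp [hw]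
  rw [if_neg (by simp [ha, hw])]
  have h := fold_before workflow_stages affected_stages none
  have hb : pvBefore workflow_stages none = false := rfl
  rw [hb, Bool.false_or] at h
  have hmatch : (match affected_stages.foldl (pvCascadeStep workflow_stages) none with
      | none => false
      | some earliest_index => decide ((earliest_index : Int) < (workflow_stages.length : Int) - 1))
      = pvBefore workflow_stages (affected_stages.foldl (pvCascadeStep workflow_stages) none) := by
    cases affected_stages.foldl (pvCascadeStep workflow_stages) none with
    | none => rfl
    | some e =>
      simp only [pvBefore]
      rw [decide_eq_decide]
      omega
  rw [hmatch, h]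
  simp only [List.contains_eq_mem]

-- ===== VERDICT (by name: the statement is the Claim_ definition above) =====
theorem is_cascade_needed_spec : Claim_equal_is_cascade_needed := by
  intro affected_stages workflow_stages _
  unfold Spec_is_cascade_needed
  exact pv_main affected_stages workflow_stages
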